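-- pv_equiv track=rewrite | github.com/csandoval18/DSA | CodeNinjas/Two Pointers/move_zeroes.py | moveZeroesToLeft
-- ===== SOURCE A (Python) =====
-- def moveZeroesToLeft(arr, n):
--   a, b = n-1, n-1
--   #a = r, b = l
--
--   while b >= 0:
--     if arr[b] != 0:
--       arr[a], arr[b] = arr[b], arr[a]
--       a -= 1
--     b -= 1
--   return arr
-- ===== SOURCE B (Python) =====
-- def moveZeroesToLeft(arr, n):
--   # Rebuild arr[:n] in two passes instead of swapping in place.
--   # (Mutates arr in place like A; return value is the same list object.)
--   if n <= 0:
--     return arr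
--   nonzeros = [x for x in arr[:n] if x != 0]
--   arr[:n] = [0] * (n - len(nonzeros)) + nonzeros
--   return arr
-- ===== Notes on version B (the rewrite author's own statement) =====
-- stated objective: simpler
-- what changed: Replaces A's in-place right-to-left two-pointer swap loop by a two-pass rebuild: filter the non-zeros of arr[:n], prepend the matching number of zeros, and splice back via slice assignment.
import Mathlib
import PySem

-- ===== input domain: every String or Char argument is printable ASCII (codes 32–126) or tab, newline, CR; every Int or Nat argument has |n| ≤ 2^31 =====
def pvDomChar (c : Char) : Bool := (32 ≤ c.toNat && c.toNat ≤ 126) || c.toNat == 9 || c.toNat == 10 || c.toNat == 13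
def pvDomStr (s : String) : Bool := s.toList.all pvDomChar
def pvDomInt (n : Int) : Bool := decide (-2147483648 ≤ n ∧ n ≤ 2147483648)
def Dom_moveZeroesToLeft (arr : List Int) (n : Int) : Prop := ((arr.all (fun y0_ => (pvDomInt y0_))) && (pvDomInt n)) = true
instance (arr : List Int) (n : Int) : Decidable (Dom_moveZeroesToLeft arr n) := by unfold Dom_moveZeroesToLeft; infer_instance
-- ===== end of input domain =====

-- B rebuilds arr[:n] in two passes (filter the non-zeros, prepend the zeros) instead of
-- A's in-place right-to-left swap loop; the equivalence proved is about the RETURN value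
-- (both Pythons mutate and return the same list object).

-- ===== PORT A =====
-- while b >= 0: if arr[b] != 0: swap arr[a],arr[b]; a -= 1; b -= 1
def pvLoopA (arr : List Int) (a b : Int) : List Int :=
  if hb : 0 ≤ b then
    match PySem.List.pyGet? arr b with
    | none => arr   -- IndexError in Python: excluded by Pre_
    | some v =>
      if v ≠ 0 then
        -- arr[a], arr[b] = arr[b], arr[a]  (a is in range whenever Pre_ holds)
        pvLoopA (PySem.List.pySetD (PySem.List.pySetD arr a v) b (PySem.List.pyGetD arr a 0)) (a - 1) (b - 1)
      else
        pvLoopA arr a (b - 1)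
  else arr
termination_by (b + 1).toNat
decreasing_by all_goals omega

def moveZeroesToLeft (arr : List Int) (n : Int) : List Int :=
  pvLoopA arr (n - 1) (n - 1)

-- ===== PORT B =====
def moveZeroesToLeft_alt (arr : List Int) (n : Int) : List Int :=
  if n ≤ 0 then arr
  else
    let nonzeros := (PySem.List.slice arr none (some n)).filter (fun x => x ≠ 0)
    List.replicate (n - nonzeros.length).toNat 0 ++ nonzeros ++ arr.drop n.toNat

-- ===== PRECONDITION & SPEC =====
-- Pre_ excludes exactly n > len(arr): there A raises IndexError (arr[n-1] out of range).
def Pre_moveZeroesToLeft (arr : List Int) (n : Int) : Prop := n ≤ (arr.length : Int)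
instance (arr : List Int) (n : Int) : Decidable (Pre_moveZeroesToLeft arr n) := by unfold Pre_moveZeroesToLeft; infer_instance
def pvWitness_moveZeroesToLeft : List Int × Int := ([0, 1, 0, 2], 4)

def Spec_moveZeroesToLeft (arr : List Int) (n : Int) (out : List Int) : Prop := out = moveZeroesToLeft_alt arr n
instance (arr : List Int) (n : Int) (out : List Int) : Decidable (Spec_moveZeroesToLeft arr n out) := by unfold Spec_moveZeroesToLeft; infer_instance

-- ===== CLAIM (what is proved, stated in full; the proofs are below) =====
def Claim_equal_moveZeroesToLeft : Prop := ∀ (arr : List Int) (n : Int), Dom_moveZeroesToLeft arr n → Pre_moveZeroesToLeft arr n → Spec_moveZeroesToLeft arr n (moveZeroesToLeft arr n)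

-- ===== LEMMAS AND PROOFS =====

-- writing/reading the cell just past a prefix
lemma pv_set_at_len (P : List Int) (x v : Int) (rest : List Int) :
    (P ++ x :: rest).set P.length v = P ++ v :: rest := by
  simp

lemma pv_getD_at_len (P : List Int) (x d : Int) (rest : List Int) :
    (P ++ x :: rest).getD P.length d = x := by
  simp [List.getD]

-- Invariant of A's swap loop: with P the still-unprocessed prefix, to its right a block of
-- k zeros (the zeros swapped left so far, a = b + k) and then the non-zeros already placed,
-- the loop reassembles everything into zeros ++ non-zeros of P ++ NZ, leaving T untouched.
lemma pv_loopA_reassemble (P : List Int) : ∀ (k : Nat) (NZ T : List Int),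
    pvLoopA (P ++ List.replicate k 0 ++ NZ ++ T) ((P.length : Int) - 1 + k) ((P.length : Int) - 1)
      = List.replicate (k + P.countP (fun x => decide (x = 0))) 0
          ++ P.filter (fun x => decide (x ≠ 0)) ++ NZ ++ T := by
  induction P using List.reverseRecOn with
  | nil =>
    intro k NZ T
    rw [pvLoopA]
    simp
  | append_singleton P' x ih =>
    intro k NZ T
    rw [show (((P' ++ [x]).length : Int) - 1) = (P'.length : Int) by simp]
    rw [show (P' ++ [x]) ++ List.replicate k 0 ++ NZ ++ T = P' ++ x :: (List.replicate k 0 ++ NZ ++ T) by simp]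
    rw [pvLoopA, dif_pos (by positivity), PySem.List.pyGet?_append_length]
    by_cases hx : x = 0
    · simp only [hx, ne_eq, not_true_eq_false, if_false]
      have h1 : (P' : List Int) ++ (0:Int) :: (List.replicate k 0 ++ NZ ++ T)
          = P' ++ List.replicate (k+1) 0 ++ NZ ++ T := by
        simp [List.replicate_succ]
      have h2 : (P'.length : Int) + k = (P'.length : Int) - 1 + (k+1 : Nat) := by push_cast; ring
      rw [h1, h2, ih (k+1) NZ T]
      simp [List.countP_append, List.filter_append]
      rw [show k + (List.countP (fun x => decide (x = 0)) P' + 1) = k + 1 + List.countP (fun x => decide (x = 0)) P' from by omega]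
    · simp only [ne_eq, hx, not_false_eq_true, if_true]
      cases k with
      | zero =>
        have ha : (P'.length : Int) + ((0:Nat) : Int) = ((P'.length : Nat) : Int) := by push_cast; ring
        rw [show (P' ++ (x:Int) :: (List.replicate 0 0 ++ NZ ++ T)) = P' ++ x :: (NZ ++ T) by simp,
          ha]
        simp only [PySem.List.pySetD_natCast, PySem.List.pyGetD_natCast]
        rw [pv_getD_at_len, pv_set_at_len, pv_set_at_len]
        have := ih 0 (x :: NZ) T
        simp only [List.replicate, List.nil_append, List.append_assoc, List.cons_append,
          Nat.cast_zero, add_zero] at this ⊢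
        rw [this]
        simp [List.countP_append, List.filter_append, hx]
      | succ k' =>
        have harr : P' ++ (x:Int) :: (List.replicate (k'+1) 0 ++ NZ ++ T)
            = (P' ++ x :: List.replicate k' 0) ++ (0:Int) :: (NZ ++ T) := by
          simp [List.replicate_succ']
        have ha : (P'.length : Int) + (((k'+1) : Nat) : Int)
            = (((P' ++ x :: List.replicate k' 0).length : Nat) : Int) := by
          simp only [List.length_append, List.length_cons, List.length_replicate]
          push_cast; ring
        rw [harr, ha]
        simp only [PySem.List.pySetD_natCast, PySem.List.pyGetD_natCast]
        rw [pv_getD_at_len, pv_set_at_len]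
        rw [show ((P' ++ x :: List.replicate k' 0) ++ (x:Int) :: (NZ ++ T))
            = P' ++ x :: (List.replicate k' 0 ++ x :: (NZ ++ T)) by simp]
        rw [pv_set_at_len]
        have hl : P' ++ (0:Int) :: (List.replicate k' 0 ++ x :: (NZ ++ T))
            = P' ++ List.replicate (k'+1) 0 ++ (x :: NZ) ++ T := by
          simp [List.replicate_succ]
        have hb2 : (((P' ++ x :: List.replicate k' 0).length : Nat) : Int) - 1
            = (P'.length : Int) - 1 + (((k'+1) : Nat) : Int) := by
          simp only [List.length_append, List.length_cons, List.length_replicate]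
          push_cast; ring
        rw [hl, hb2, ih (k'+1) (x :: NZ) T]
        simp [List.countP_append, List.filter_append, hx]

-- ===== VERDICT (by name: the statement is the Claim_ definition above) =====
theorem moveZeroesToLeft_spec : Claim_equal_moveZeroesToLeft := by
  intro arr n _hdom hpre
  unfold Pre_moveZeroesToLeft at hpre
  unfold Spec_moveZeroesToLeft moveZeroesToLeft
  by_cases hn : n ≤ 0
  · rw [pvLoopA, dif_neg (by omega), moveZeroesToLeft_alt, if_pos hn]
  · set m := n.toNat with hm
    have hmn : (m : Int) = n := by omega
    have hml : m ≤ arr.length := by omega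
    have key := pv_loopA_reassemble (arr.take m) 0 [] (arr.drop m)
    have hlen : (arr.take m).length = m := by rw [List.length_take]; omega
    rw [hlen] at key
    simp only [List.replicate, List.append_nil, List.take_append_drop,
      Nat.cast_zero, add_zero, zero_add, List.append_assoc] at key
    rw [hmn] at key
    rw [key, moveZeroesToLeft_alt, if_neg hn, ← hmn, PySem.List.slice_to_natCast]
    have h1 : ((arr.take m).filter (fun x => decide (x ≠ 0))).length
        + (arr.take m).countP (fun x => decide (x = 0)) = m := by
      rw [← List.countP_eq_length_filter]
      have := List.length_eq_countP_add_countP (p := fun x => decide (x = 0)) (l := arr.take m)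
      simp only [ne_eq, decide_not, Bool.decide_coe] at *
      omega
    simp only [Int.toNat_natCast]
    rw [show ((m : Int) - ↑((arr.take m).filter (fun x => decide (x ≠ 0))).length).toNat
        = (arr.take m).countP (fun x => decide (x = 0)) from by omega]
    rw [List.append_assoc]
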